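-- pv_equiv track=rewrite | github.com/keithy1012/CodeSwitchProject | scripts/random_forest.py | flatten_examples
-- ===== SOURCE A (Python) =====
-- from typing import List, Dict
--
-- def flatten_examples(data: List[Dict]):
--     contexts, labels = [], []
--     for ex in data:
--         tokens = ex['tokens']
--         switch_labels = ex['switch_labels']
--         for i in range(len(switch_labels)):
--             context = " ".join(tokens[:i+1])  # context up to current token
--             contexts.append(context)
--             labels.append(switch_labels[i])
--     return contexts, labels
-- ===== SOURCE B (Python) =====
-- def flatten_examples(data):
--     contexts, labels = [], []
--     for ex in data:
--         tokens = ex['tokens']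
--         switch_labels = ex['switch_labels']
--         n = len(switch_labels)
--         prefixes = []
--         cur = None
--         for t in tokens[:n]:
--             cur = t if cur is None else cur + " " + t
--             prefixes.append(cur)
--         full = cur if cur is not None else ""
--         prefixes.extend([full] * (n - len(prefixes)))
--         contexts.extend(prefixes)
--         labels.extend(switch_labels)
--     return contexts, labels
-- ===== Notes on version B (the rewrite author's own statement) =====
-- stated objective: alternative
-- what changed: B builds each example's cumulative contexts in one incremental pass over the tokens (maintaining the running joined prefix, then padding with the full join when there are more labels than tokens), instead of A's re-slicing and re-joining tokens[:i+1] for every label index.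
import Mathlib
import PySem

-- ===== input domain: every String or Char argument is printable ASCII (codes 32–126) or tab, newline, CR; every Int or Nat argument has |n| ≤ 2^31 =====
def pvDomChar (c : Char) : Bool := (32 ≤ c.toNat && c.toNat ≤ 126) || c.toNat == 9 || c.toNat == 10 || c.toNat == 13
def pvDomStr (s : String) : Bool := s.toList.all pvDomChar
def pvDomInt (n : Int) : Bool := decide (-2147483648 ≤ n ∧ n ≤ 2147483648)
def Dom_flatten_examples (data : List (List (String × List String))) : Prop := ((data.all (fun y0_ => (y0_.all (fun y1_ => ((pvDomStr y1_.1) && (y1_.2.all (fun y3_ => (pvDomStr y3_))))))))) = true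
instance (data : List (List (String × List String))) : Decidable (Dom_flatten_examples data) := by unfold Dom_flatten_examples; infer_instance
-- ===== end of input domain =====

-- B replaces A's per-label re-slice-and-rejoin of the token prefix by one incremental pass
-- that maintains the running joined prefix (objective: alternative decomposition; same asymptotic
-- cost, since the output itself has that size).

-- ===== PORT A =====
def flatten_examples (data : List (List (String × List String))) : List String × List String :=
  data.foldl (fun acc ex =>
    let d := PySem.Dict.ofList ex
    match d.get? "tokens", d.get? "switch_labels" with
    | some tokens, some switch_labels =>
        (PySem.List.pyRange 0 (switch_labels.length : Int) 1).foldl (fun acc2 i =>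
          let context := PySem.Str.join " " (PySem.List.slice tokens none (some (i + 1)))
          (acc2.1 ++ [context], acc2.2 ++ [PySem.List.pyGetD switch_labels i ""])) acc
    | _, _ => acc)  -- KeyError in Python: excluded by Pre_flatten_examples
    ([], [])

-- ===== PORT B =====
-- the inner 'for t in tokens[:n]' loop of Source B: running prefix string + collected prefixes
def altPrefixes (ts : List String) : List String × Option String :=
  ts.foldl (fun pc t =>
    let cur' := match pc.2 with | none => t | some c => c ++ " " ++ t
    (pc.1 ++ [cur'], some cur')) ([], none)

-- port of Source B; the KeyError fallbacks (Option.elim base case) are outside Pre_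
def flatten_examples_alt (data : List (List (String × List String))) : List String × List String :=
  data.foldl (fun acc ex =>
    let d := PySem.Dict.ofList ex
    ((d.get? "tokens").elim acc (fun tokens =>
      (d.get? "switch_labels").elim acc (fun switch_labels =>
        let n := switch_labels.length
        let pc := altPrefixes (tokens.take n)
        let full := pc.2.getD ""
        let prefixes := pc.1 ++ List.replicate (n - pc.1.length) full
        (acc.1 ++ prefixes, acc.2 ++ switch_labels)))))
    ([], [])

-- ===== PRECONDITION & SPEC =====
-- Pre_ excludes exactly the inputs on which Python A raises KeyError: an example dict
-- missing the 'tokens' or 'switch_labels' key.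
def Pre_flatten_examples (data : List (List (String × List String))) : Prop :=
  (data.all (fun ex =>
    (PySem.Dict.ofList ex).contains "tokens" && (PySem.Dict.ofList ex).contains "switch_labels")) = true
instance (data : List (List (String × List String))) : Decidable (Pre_flatten_examples data) := by
  unfold Pre_flatten_examples; infer_instance

def pvWitness_flatten_examples : (List (List (String × List String))) :=
  [[("tokens", ["a", "b"]), ("switch_labels", ["0", "1", "0"])],
   [("tokens", []), ("switch_labels", ["1"])]]

def Spec_flatten_examples (data : List (List (String × List String))) (out : List String × List String) : Prop := out = flatten_examples_alt data
instance (data : List (List (String × List String))) (out : List String × List String) : Decidable (Spec_flatten_examples data out) := by unfold Spec_flatten_examples; infer_instance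

-- ===== CLAIM (what is proved, stated in full; the proofs are below) =====
def Claim_equal_flatten_examples : Prop := ∀ (data : List (List (String × List String))), Dom_flatten_examples data → Pre_flatten_examples data → Spec_flatten_examples data (flatten_examples data)

-- ===== LEMMAS AND PROOFS =====

-- " ".join with one more part on the right
theorem chars_join_snoc (sep : List Char) (ps : List (List Char)) (q : List Char) :
    PySem.Chars.join sep (ps ++ [q]) =
      (match ps with | [] => q | _ :: _ => PySem.Chars.join sep ps ++ sep ++ q) := by
  induction ps with
  | nil => simp [PySem.Chars.join_singleton]
  | cons p rest ih =>
    cases rest with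
    | nil => simp [PySem.Chars.join_cons_cons, PySem.Chars.join_singleton]
    | cons r rs =>
      simp only [List.cons_append, PySem.Chars.join_cons_cons] at ih ⊢
      rw [ih]
      simp [List.append_assoc]

theorem str_join_snoc (ps : List String) (q : String) :
    PySem.Str.join " " (ps ++ [q]) =
      (match ps with | [] => q | _ :: _ => PySem.Str.join " " ps ++ " " ++ q) := by
  apply String.toList_inj.mp
  rw [PySem.Str.toList_join, List.map_append, List.map_singleton, chars_join_snoc]
  cases ps with
  | nil => rfl
  | cons p rest => simp [String.toList_append, PySem.Str.toList_join]

-- characterisation of Source B's inner loop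
theorem altPrefixes_eq (ts : List String) :
    altPrefixes ts =
      ((List.range ts.length).map (fun k => PySem.Str.join " " (ts.take (k + 1))),
       match ts with | [] => none | _ :: _ => some (PySem.Str.join " " ts)) := by
  induction ts using List.reverseRecOn with
  | nil => rfl
  | append_singleton ts t ih =>
    unfold altPrefixes
    rw [List.foldl_append]
    show (fun pc t =>
        let cur' := match pc.2 with | none => t | some c => c ++ " " ++ t
        (pc.1 ++ [cur'], some cur')) (altPrefixes ts) t = _
    rw [ih]
    simp only [List.length_append, List.length_singleton, List.range_succ, List.map_append,
      List.map_singleton]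
    have hcur : (match (match ts with | [] => (none : Option String) | _ :: _ => some (PySem.Str.join " " ts)) with
        | none => t | some c => c ++ " " ++ t) = PySem.Str.join " " (ts ++ [t]) := by
      rw [str_join_snoc]; cases ts <;> rfl
    have htake : ∀ k, k < ts.length →
        (ts ++ [t]).take (k + 1) = ts.take (k + 1) := by
      intro k hk
      rw [List.take_append_of_le_length (by omega)]
    rw [hcur]
    refine Prod.ext ?_ ?_
    · show _ ++ [PySem.Str.join " " (ts ++ [t])] = _ ++ [PySem.Str.join " " ((ts ++ [t]).take (ts.length + 1))]
      rw [List.take_of_length_le (by simp)]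
      congr 1
      exact (List.map_congr_left (fun k hk => by
          rw [htake k (List.mem_range.mp hk)])).symm
    · cases ts <;> rfl

-- labels: reading out switch_labels index by index reproduces it
theorem map_range_getD (sl : List String) :
    (List.range sl.length).map (fun k => sl.getD k "") = sl := by
  apply List.ext_getElem
  · simp
  · intro k h1 h2
    simp [List.getD_eq_getElem?_getD, List.getElem?_eq_getElem h2]

-- A's inner pair-appending fold, split into two maps
theorem foldl_pair_append {α β γ : Type} (f : α → β) (g : α → γ) (l : List α)
    (acc : List β × List γ) :
    l.foldl (fun acc2 x => (acc2.1 ++ [f x], acc2.2 ++ [g x])) acc =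
      (acc.1 ++ l.map f, acc.2 ++ l.map g) := by
  induction l generalizing acc with
  | nil => simp
  | cons x xs ih => simp [ih]

-- the per-example contexts agree
theorem contexts_eq (tokens sl : List String) :
    (List.range sl.length).map
        (fun k => PySem.Str.join " " (tokens.take (k + 1))) =
      (altPrefixes (tokens.take sl.length)).1 ++
        List.replicate (sl.length - (altPrefixes (tokens.take sl.length)).1.length)
          ((altPrefixes (tokens.take sl.length)).2.getD "") := by
  rw [altPrefixes_eq]
  simp only [List.length_take]
  set n := sl.length with hn
  set m := min n tokens.length with hm
  apply List.ext_getElem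
  · simp only [List.length_map, List.length_range, List.length_append, List.length_replicate]
    omega
  · intro k h1 h2
    simp only [List.getElem_map, List.getElem_range]
    simp only [List.length_map, List.length_range, List.length_append,
      List.length_replicate] at h1 h2
    by_cases hk : k < m
    · rw [List.getElem_append_left (by simpa using hk)]
      simp only [List.getElem_map, List.getElem_range]
      rw [List.take_take, min_eq_left (by omega)]
    · have hmlen : m ≤ k := by omega
      have htl : tokens.length ≤ k := by omega
      rw [List.getElem_append_right (by simpa using hmlen)]
      simp only [List.getElem_replicate, List.length_map, List.length_range]
      have htok : tokens.take n = tokens := by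
        apply List.take_of_length_le; omega
      have htok1 : tokens.take (k + 1) = tokens := by
        apply List.take_of_length_le; omega
      rw [htok, htok1]
      cases tokens with
      | nil => rfl
      | cons a as => rfl

-- one step of the outer fold agrees
theorem step_eq (acc : List String × List String) (ex : List (String × List String)) :
    (let d := PySem.Dict.ofList ex
     match d.get? "tokens", d.get? "switch_labels" with
     | some tokens, some switch_labels =>
         (PySem.List.pyRange 0 (switch_labels.length : Int) 1).foldl (fun acc2 i =>
           let context := PySem.Str.join " " (PySem.List.slice tokens none (some (i + 1)))
           (acc2.1 ++ [context], acc2.2 ++ [PySem.List.pyGetD switch_labels i ""])) acc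
     | _, _ => acc) =
    (let d := PySem.Dict.ofList ex
     ((d.get? "tokens").elim acc (fun tokens =>
       (d.get? "switch_labels").elim acc (fun switch_labels =>
         let n := switch_labels.length
         let pc := altPrefixes (tokens.take n)
         let full := pc.2.getD ""
         let prefixes := pc.1 ++ List.replicate (n - pc.1.length) full
         (acc.1 ++ prefixes, acc.2 ++ switch_labels))))) := by
  cases ht : (PySem.Dict.ofList ex).get? "tokens" with
  | none => simp [ht]
  | some tokens =>
    cases hs : (PySem.Dict.ofList ex).get? "switch_labels" with
    | none => simp [ht, hs]
    | some sl =>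
      simp only [ht, hs]
      rw [PySem.List.pyRange_zero_nat, List.foldl_map, foldl_pair_append]
      have hctx : (List.range sl.length).map
          (fun k => PySem.Str.join " " (PySem.List.slice tokens none (some ((k : Nat) + 1)))) =
          (List.range sl.length).map (fun k => PySem.Str.join " " (tokens.take (k + 1))) :=
        List.map_congr_left (fun k _ => by
          have h1 : ((k : Int) + 1) = ((k + 1 : Nat) : Int) := by push_cast; ring
          rw [h1, PySem.List.slice_to_natCast])
      have hlab : (List.range sl.length).map (fun k : Nat => PySem.List.pyGetD sl (k : Int) "") = sl := by
        calc (List.range sl.length).map (fun k : Nat => PySem.List.pyGetD sl (k : Int) "")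
            = (List.range sl.length).map (fun k => sl.getD k "") :=
              List.map_congr_left (fun k _ => PySem.List.pyGetD_natCast sl k "")
          _ = sl := map_range_getD sl
      rw [hlab, hctx, contexts_eq tokens sl]
      rfl

-- ===== VERDICT (by name: the statement is the Claim_ definition above) =====
theorem flatten_examples_spec : Claim_equal_flatten_examples := by
  intro data _ _
  unfold Spec_flatten_examples flatten_examples flatten_examples_alt
  have hstep := funext (fun acc => funext (fun ex => step_eq acc ex))
  exact congrFun (congrFun (congrArg List.foldl hstep) ([], [])) data |>.symm ▸ rfl
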